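-- pv_equiv track=rewrite | github.com/EPFL-TOP/lightsheet-live-tracking-tool | tracking_tools/utils/tracking_utils.py | sweepLine1D
-- ===== SOURCE A (Python) =====
-- def sweepLine1D(arr) :
--     # intervals are (ymin, ymax, weight)
--     # Create event for each start and end of segments
--     events = []
--     for ymin, ymax, w in arr :
--         events.append((ymin, +w))
--         events.append((ymax, -w))
--
--     # Sort events by coordinate, then by type (end is processed before start)
--     events.sort(key=lambda e: (e[0], e[1]))
--
--     active = 0
--     max_count = 0
--     intervals = []
--     last_y = None
--
--     for y, typ in events :
--         if last_y is not None and active == max_count and y > last_y: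
--             intervals.append((last_y, y))
--         active += typ
--         if active > max_count:
--             max_count = active
--             intervals = []
--             last_y = y
--         elif active == max_count :
--             last_y = y
--         else :
--             last_y = y
--
--     return max_count, intervals
-- ===== SOURCE B (Python) =====
-- def sweepLine1D(arr):
--     # intervals are (ymin, ymax, weight)
--     events = sorted(e for ymin, ymax, w in arr for e in ((ymin, w), (ymax, -w)))
--     levels = []
--     a = 0
--     for _, t in events:
--         a += t
--         levels.append(a)
--     M = max([0] + levels)
--     intervals = [(y1, y2)
--                  for (y1, _), (y2, _), lv in zip(events, events[1:], levels)
--                  if lv == M and y1 < y2]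
--     return M, intervals
-- ===== Notes on version B (the rewrite author's own statement) =====
-- stated objective: simpler
-- what changed: Replaces A's single stateful sweep (which interleaves interval collection with destructive resets each time a new maximum is found) with a data-flow pipeline: sorted events, a materialised prefix-level array, M = max of the levels, and one comprehension over zip(events, events[1:], levels) picking the gaps at level M.
import Mathlib
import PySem

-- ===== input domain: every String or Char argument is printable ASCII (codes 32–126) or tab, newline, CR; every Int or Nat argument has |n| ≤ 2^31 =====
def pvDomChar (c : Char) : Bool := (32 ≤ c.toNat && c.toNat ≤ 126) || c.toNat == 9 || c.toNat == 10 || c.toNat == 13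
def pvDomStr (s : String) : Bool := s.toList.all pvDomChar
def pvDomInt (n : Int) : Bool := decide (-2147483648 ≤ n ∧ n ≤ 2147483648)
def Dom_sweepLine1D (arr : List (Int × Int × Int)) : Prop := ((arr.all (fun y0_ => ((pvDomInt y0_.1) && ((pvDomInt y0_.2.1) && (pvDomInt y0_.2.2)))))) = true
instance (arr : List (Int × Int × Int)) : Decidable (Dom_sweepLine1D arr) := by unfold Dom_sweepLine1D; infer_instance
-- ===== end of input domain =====

-- B replaces A's single stateful sweep (which collects intervals and destructively resets
-- them each time a new maximum is discovered) by a data-flow pipeline: sorted events, a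
-- materialised prefix-level array, M = max of the levels, and one comprehension over
-- zip(events, events[1:], levels) collecting the gaps at level M (objective: simpler).

-- ===== PORT A =====
-- the loop body of A's single sweep; state = (active, max_count, intervals, last_y)
def aStep (st : Int × Int × List (Int × Int) × Option Int) (e : Int × Int) :
    Int × Int × List (Int × Int) × Option Int :=
  let (active, max_count, intervals, last_y) := st
  let (y, typ) := e
  let intervals :=
    match last_y with
    | some ly => if active = max_count ∧ ly < y then intervals ++ [(ly, y)] else intervals
    | none => intervals
  let active := active + typ
  if max_count < active then (active, active, ([] : List (Int × Int)), some y)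
  else (active, max_count, intervals, some y)

def sweepLine1D (arr : List (Int × Int × Int)) : Int × (List (Int × Int)) :=
  let events := arr.foldl (fun acc p => acc ++ [(p.1, p.2.2), (p.2.1, -p.2.2)]) []
  let events := PySem.List.sorted2 events (fun e => e.1) (fun e => e.2)
  let st := events.foldl aStep (0, 0, [], none)
  (st.2.1, st.2.2.1)

-- ===== PORT B =====
def sweepLine1D_alt (arr : List (Int × Int × Int)) : Int × (List (Int × Int)) :=
  -- events = sorted(e for ymin, ymax, w in arr for e in ((ymin, w), (ymax, -w)))
  -- (Python compares the 2-tuples lexicographically = key (e[0], e[1]))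
  let events := PySem.List.sorted2 (arr.flatMap (fun p => [(p.1, p.2.2), (p.2.1, -p.2.2)]))
      (fun e => e.1) (fun e => e.2)
  -- levels[i] = running level after event i
  let levels := (events.foldl (fun (s : Int × List Int) e => (s.1 + e.2, s.2 ++ [s.1 + e.2]))
      ((0 : Int), ([] : List Int))).2
  -- M = max([0] + levels)  (the list is nonempty, so Python's max never raises)
  let M := (PySem.List.max? ((0 : Int) :: levels) (fun y => y)).getD 0
  -- [(y1, y2) for (y1,_), (y2,_), lv in zip(events, events[1:], levels) if lv == M and y1 < y2]
  let tri := events.zip ((PySem.List.slice events (some 1)).zip levels)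
  let intervals := (tri.filter (fun t => decide (t.2.2 = M) && decide (t.1.1 < t.2.1.1))).map
      (fun t => (t.1.1, t.2.1.1))
  (M, intervals)

-- ===== PRECONDITION & SPEC =====
def Spec_sweepLine1D (arr : List (Int × Int × Int)) (out : Int × (List (Int × Int))) : Prop := out = sweepLine1D_alt arr
instance (arr : List (Int × Int × Int)) (out : Int × (List (Int × Int))) : Decidable (Spec_sweepLine1D arr out) := by unfold Spec_sweepLine1D; infer_instance

-- ===== CLAIM =====
def Claim_equal_sweepLine1D : Prop := ∀ (arr : List (Int × Int × Int)), Dom_sweepLine1D arr → Spec_sweepLine1D arr (sweepLine1D arr)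

-- ===== LEMMAS AND PROOFS =====

-- pure recursive mirror of A's running maximum
def mx : List (Int × Int) → Int → Int → Int
  | [], _, m => m
  | (_, t) :: es, a, m => mx es (a + t) (if m < a + t then a + t else m)

-- pure recursive mirror of A's final interval collection at fixed level M
def col : List (Int × Int) → Int → Int → Option Int → List (Int × Int)
  | [], _, _, _ => []
  | (y, t) :: es, a, M, l =>
      (match l with
       | some ly => if a = M ∧ ly < y then [(ly, y)] else []
       | none => []) ++ col es (a + t) M (some y)

-- the list of running levels after each event, starting from level a
def prefixLevels : List (Int × Int) → Int → List Int
  | [], _ => []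
  | e :: es, a => (a + e.2) :: prefixLevels es (a + e.2)

theorem mx_ge (es : List (Int × Int)) : ∀ a m, m ≤ mx es a m := by
  induction es with
  | nil => intro a m; exact le_refl m
  | cons e es ih =>
      intro a m
      obtain ⟨y, t⟩ := e
      simp only [mx]
      by_cases h : m < a + t
      · simp only [if_pos h]; exact le_of_lt (lt_of_lt_of_le h (ih _ _))
      · simp only [if_neg h]; exact ih _ _

-- A's intertwined sweep computes the running maximum and the gaps at that maximum
theorem main_lemma (es : List (Int × Int)) :
    ∀ a m I l, a ≤ m →
      (es.foldl aStep (a, m, I, l)).2.1 = mx es a m ∧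
      (es.foldl aStep (a, m, I, l)).2.2.1 =
        (if m = mx es a m then I else []) ++ col es a (mx es a m) l := by
  induction es with
  | nil => intro a m I l _; simp [mx, col]
  | cons e es ih =>
    intro a m I l ham
    obtain ⟨y, t⟩ := e
    cases l with
    | none =>
      by_cases hgt : m < a + t
      · have hM : a + t ≤ mx es (a + t) (a + t) := mx_ge es (a + t) (a + t)
        obtain ⟨h1, h2⟩ := ih (a + t) (a + t) [] (some y) le_rfl
        simp only [List.foldl, aStep, mx, col, if_pos hgt]
        refine ⟨h1, ?_⟩
        rw [h2, if_neg (show ¬ m = mx es (a + t) (a + t) by omega)]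
        simp
      · obtain ⟨h1, h2⟩ := ih (a + t) m I (some y) (by omega)
        simp only [List.foldl, aStep, mx, col, if_neg hgt]
        exact ⟨h1, by rw [h2]; simp⟩
    | some ly =>
      by_cases hgt : m < a + t
      · have hM : a + t ≤ mx es (a + t) (a + t) := mx_ge es (a + t) (a + t)
        obtain ⟨h1, h2⟩ := ih (a + t) (a + t) [] (some y) le_rfl
        simp only [List.foldl, aStep, mx, col, if_pos hgt]
        refine ⟨h1, ?_⟩
        rw [h2, if_neg (show ¬ m = mx es (a + t) (a + t) by omega),
            if_neg (show ¬ (a = mx es (a + t) (a + t) ∧ ly < y) from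
              fun h => absurd h.1 (by omega))]
        simp
      · obtain ⟨h1, h2⟩ :=
          ih (a + t) m (if a = m ∧ ly < y then I ++ [(ly, y)] else I) (some y) (by omega)
        simp only [List.foldl, aStep, mx, col, if_neg hgt]
        have hmM : m ≤ mx es (a + t) m := mx_ge es (a + t) m
        refine ⟨h1, ?_⟩
        rw [h2]
        by_cases hm : m = mx es (a + t) m
        · rw [if_pos hm, if_pos hm]
          by_cases hc : a = m ∧ ly < y
          · rw [if_pos hc,
                if_pos (show a = mx es (a + t) m ∧ ly < y from ⟨hc.1.trans hm, hc.2⟩)]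
            simp
          · rw [if_neg hc,
                if_neg (show ¬ (a = mx es (a + t) m ∧ ly < y) from
                  fun h => hc ⟨h.1.trans hm.symm, h.2⟩)]
            simp
        · have haM : a ≠ mx es (a + t) m := by omega
          rw [if_neg hm, if_neg hm,
              if_neg (show ¬ (a = mx es (a + t) m ∧ ly < y) from fun h => haM h.1)]
          simp

-- B's level-building loop materialises exactly the prefix levels
theorem levels_fold (es : List (Int × Int)) :
    ∀ (a : Int) (L : List Int),
      es.foldl (fun (s : Int × List Int) e => (s.1 + e.2, s.2 ++ [s.1 + e.2])) (a, L)
        = (a + (es.map (fun e => e.2)).sum, L ++ prefixLevels es a) := by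
  induction es with
  | nil => intro a L; simp [prefixLevels]
  | cons e es ih =>
      intro a L
      simp only [List.foldl, List.map, List.sum_cons, prefixLevels]
      rw [ih]
      simp [add_assoc]

-- A's running maximum is the fold of max over the prefix levels
theorem mx_eq_foldl_max (es : List (Int × Int)) :
    ∀ a m, mx es a m = (prefixLevels es a).foldl max m := by
  induction es with
  | nil => intro a m; rfl
  | cons e es ih =>
      intro a m
      obtain ⟨y, t⟩ := e
      simp only [mx, prefixLevels, List.foldl]
      rw [ih]
      congr 1
      omega

-- A's collection at level M equals B's comprehension over zip(events, events[1:], levels)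
theorem col_eq_zip (M : Int) (es : List (Int × Int)) :
    ∀ (e0 : Int × Int) (a : Int),
      col es a M (some e0.1) =
        (((e0 :: es).zip (es.zip (a :: prefixLevels es a))).filter
            (fun t => decide (t.2.2 = M) && decide (t.1.1 < t.2.1.1))).map
          (fun t => (t.1.1, t.2.1.1)) := by
  induction es with
  | nil => intro e0 a; rfl
  | cons e1 es ih =>
      intro e0 a
      obtain ⟨y1, t1⟩ := e1
      simp only [col, prefixLevels, List.zip_cons_cons, List.filter]
      rw [ih ⟨y1, t1⟩ (a + t1)]
      by_cases hc : a = M ∧ e0.1 < y1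
      · rw [if_pos hc]
        have : (decide (a = M) && decide (e0.1 < y1)) = true := by
          simp [hc.1, hc.2]
        simp only [this, List.map]
        rfl
      · rw [if_neg hc]
        have : (decide (a = M) && decide (e0.1 < y1)) = false := by
          rcases not_and_or.mp hc with h | h <;> simp [h]
        simp only [this]
        rfl

theorem sweepLine1D_eq (arr : List (Int × Int × Int)) : sweepLine1D arr = sweepLine1D_alt arr := by
  simp only [sweepLine1D, sweepLine1D_alt,
    PySem.List.foldl_append_eq_flatMap (fun p => [(p.1, p.2.2), (p.2.1, -p.2.2)]) arr [],
    List.nil_append]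
  set events := PySem.List.sorted2 (arr.flatMap (fun p => [(p.1, p.2.2), (p.2.1, -p.2.2)]))
      (fun e => e.1) (fun e => e.2) with hev
  obtain ⟨h1, h2⟩ := main_lemma events 0 0 [] none (le_refl 0)
  have hl : (events.foldl (fun (s : Int × List Int) e => (s.1 + e.2, s.2 ++ [s.1 + e.2]))
      ((0 : Int), ([] : List Int))).2 = prefixLevels events 0 := by
    rw [levels_fold]; simp
  rw [hl, PySem.List.max?_id_cons, Option.getD_some]
  have hM : mx events 0 0 = (prefixLevels events 0).foldl max 0 := mx_eq_foldl_max events 0 0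
  refine Prod.ext (by rw [h1, hM]) ?_
  rw [h2, hM]
  simp only [ite_self, List.nil_append]
  cases events with
  | nil => rfl
  | cons e0 rest =>
      have hs : PySem.List.slice (e0 :: rest) (some 1) = rest :=
        PySem.List.slice_from (e0 :: rest) (by norm_num)
      rw [hs]
      simp only [col, prefixLevels, List.nil_append]
      have := col_eq_zip ((prefixLevels (e0 :: rest) 0).foldl max 0) rest e0 (0 + e0.2)
      simp only [prefixLevels] at this ⊢
      rw [this]

-- ===== VERDICT =====
theorem sweepLine1D_spec : Claim_equal_sweepLine1D := by
  intro arr _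
  unfold Spec_sweepLine1D
  exact sweepLine1D_eq arr
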